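-- pv_equiv track=rewrite | github.com/greatgreek73/realfootballsim2 | tournaments/utils.py | check_consecutive_matches
-- ===== SOURCE A (Python) =====
-- from typing import List, Tuple, Dict, Set
--
-- def check_consecutive_matches(schedule: List[Tuple], team, is_home: bool) -> int:
--     """
--     Проверяет количество последовательных домашних или гостевых матчей для команды.
--
--     Args:
--         schedule: список матчей
--         team: команда для проверки
--         is_home: True для проверки домашних матчей, False для гостевых
--
--     Returns:
--         Максимальное количество последовательных матчей
--     """
--     max_consecutive = 0
--     current_consecutive = 0
--
--     for match in schedule:
--         if is_home:
--             is_match = match[2] == team  # home team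
--         else:
--             is_match = match[3] == team  # away team
--
--         if is_match:
--             current_consecutive += 1
--             max_consecutive = max(max_consecutive, current_consecutive)
--         else:
--             current_consecutive = 0
--
--     return max_consecutive
-- ===== SOURCE B (Python) =====
-- from itertools import groupby
--
-- def check_consecutive_matches(schedule, team, is_home: bool) -> int:
--     idx = 2 if is_home else 3
--     indicators = [match[idx] == team for match in schedule]
--     return max((sum(1 for _ in g) for key, g in groupby(indicators) if key),
--                default=0)
-- ===== Notes on version B (the rewrite author's own statement) =====
-- stated objective: alternative
-- what changed: Replaces the running max/current-counter state machine by a two-phase build-then-group shape: map the schedule to a boolean indicator list, group it into runs with itertools.groupby, and take the max length of the True runs (default 0).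
import Mathlib
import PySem

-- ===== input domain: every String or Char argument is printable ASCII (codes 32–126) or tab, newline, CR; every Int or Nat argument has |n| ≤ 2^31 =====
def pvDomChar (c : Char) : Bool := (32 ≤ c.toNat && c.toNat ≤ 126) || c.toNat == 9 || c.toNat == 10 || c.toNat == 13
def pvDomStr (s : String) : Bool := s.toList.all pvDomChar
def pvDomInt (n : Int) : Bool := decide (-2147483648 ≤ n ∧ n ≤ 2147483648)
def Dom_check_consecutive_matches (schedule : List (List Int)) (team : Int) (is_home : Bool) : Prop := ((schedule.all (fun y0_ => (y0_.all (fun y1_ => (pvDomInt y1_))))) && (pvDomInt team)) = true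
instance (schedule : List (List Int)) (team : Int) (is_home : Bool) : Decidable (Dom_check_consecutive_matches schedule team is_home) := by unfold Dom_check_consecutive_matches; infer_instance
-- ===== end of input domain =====

-- B replaces A's running max/counter state machine by a build-then-group shape: map to a
-- boolean indicator list, group it into runs, take the max True-run length (default 0).


-- ===== PORT A =====
def check_consecutive_matches (schedule : List (List Int)) (team : Int) (is_home : Bool) : Int :=
  (schedule.foldl
    (fun (st : Int × Int) m =>
      let is_match := if is_home then PySem.List.pyGet? m 2 == some team
                      else PySem.List.pyGet? m 3 == some team
      if is_match then (max st.1 (st.2 + 1), st.2 + 1) else (st.1, 0))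
    (0, 0)).1

-- ===== PORT B =====
-- port of itertools.groupby restricted to what B uses: the list of (key, run length) pairs
def pvGroupRuns : List Bool → List (Bool × Int)
  | [] => []
  | b :: bs =>
    match pvGroupRuns bs with
    | [] => [(b, 1)]
    | (k, n) :: t => if k == b then (b, n + 1) :: t else (b, 1) :: (k, n) :: t

def check_consecutive_matches_alt (schedule : List (List Int)) (team : Int) (is_home : Bool) : Int :=
  let idx : Int := if is_home then 2 else 3
  let indicators := schedule.map (fun m => PySem.List.pyGet? m idx == some team)
  -- max(..., default=0) over the lengths of the True runs
  ((pvGroupRuns indicators).filterMap (fun p => if p.1 then some p.2 else none)).foldl max 0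

-- ===== PRECONDITION & SPEC =====
-- Python A raises IndexError when some match tuple lacks the index it reads (2 if is_home else 3);
-- Pre_ excludes exactly those inputs.
def Pre_check_consecutive_matches (schedule : List (List Int)) (team : Int) (is_home : Bool) : Prop :=
  ∀ m ∈ schedule, (if is_home then 3 else 4) ≤ m.length
instance (schedule : List (List Int)) (team : Int) (is_home : Bool) : Decidable (Pre_check_consecutive_matches schedule team is_home) := by unfold Pre_check_consecutive_matches; infer_instance

def pvWitness_check_consecutive_matches : List (List Int) × Int × Bool := ([[1, 2, 3, 4], [5, 6, 3, 7]], 3, true)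

def Spec_check_consecutive_matches (schedule : List (List Int)) (team : Int) (is_home : Bool) (out : Int) : Prop := out = check_consecutive_matches_alt schedule team is_home
instance (schedule : List (List Int)) (team : Int) (is_home : Bool) (out : Int) : Decidable (Spec_check_consecutive_matches schedule team is_home out) := by unfold Spec_check_consecutive_matches; infer_instance

-- ===== CLAIM (what is proved, stated in full; the proofs are below) =====
def Claim_equal_check_consecutive_matches : Prop := ∀ (schedule : List (List Int)) (team : Int) (is_home : Bool), Dom_check_consecutive_matches schedule team is_home → Pre_check_consecutive_matches schedule team is_home → Spec_check_consecutive_matches schedule team is_home (check_consecutive_matches schedule team is_home)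

-- ===== LEMMAS AND PROOFS =====

-- A's loop, abstracted to the indicator list
def pvMaxRun : List Bool → Int → Int → Int
  | [], mx, _ => mx
  | b :: bs, mx, cur => if b then pvMaxRun bs (max mx (cur + 1)) (cur + 1) else pvMaxRun bs mx 0

-- structural "best run, seeded with current run length cur" function
def pvH : Int → List Bool → Int
  | _, [] => 0
  | cur, b :: bs => if b then max (cur + 1) (pvH (cur + 1) bs) else pvH 0 bs

def pvSel : Bool × Int → Option Int := fun p => if p.1 then some p.2 else none

def pvF (bs : List Bool) : Int := ((pvGroupRuns bs).filterMap pvSel).foldl max 0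

-- pvF with the first run's length bumped by cur, if that run is a True run
def pvBump (cur : Int) (bs : List Bool) : Int :=
  match pvGroupRuns bs with
  | (true, n) :: t => ((cur + n) :: t.filterMap pvSel).foldl max 0
  | _ => pvF bs

theorem pv_foldl_max_assoc (L : List Int) : ∀ a b : Int, L.foldl max (max a b) = max a (L.foldl max b) := by
  induction L with
  | nil => intro a b; simp [List.foldl]
  | cons x L ih =>
    intro a b
    simp only [List.foldl]
    rw [max_assoc, ih]

theorem pv_foldl_max_cons (x : Int) (L : List Int) :
    (x :: L).foldl max 0 = max x (L.foldl max 0) := by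
  simp only [List.foldl]
  rw [max_comm (0 : Int) x, pv_foldl_max_assoc]

theorem pv_foldl_eq_maxRun (team : Int) (is_home : Bool) :
    ∀ (schedule : List (List Int)) (mx cur : Int),
      (schedule.foldl
        (fun (st : Int × Int) m =>
          let is_match := if is_home then PySem.List.pyGet? m 2 == some team
                          else PySem.List.pyGet? m 3 == some team
          if is_match then (max st.1 (st.2 + 1), st.2 + 1) else (st.1, 0))
        (mx, cur)).1
      = pvMaxRun (schedule.map (fun m => PySem.List.pyGet? m (if is_home then 2 else 3) == some team)) mx cur := by
  intro schedule
  induction schedule with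
  | nil => intro mx cur; simp [pvMaxRun]
  | cons m s ih =>
    intro mx cur
    simp only [List.foldl, List.map, pvMaxRun]
    by_cases h : (PySem.List.pyGet? m (if is_home then 2 else 3) == some team) = true
    · cases is_home <;> simp_all
    · cases is_home <;> simp_all

theorem pv_maxRun_eq_H : ∀ (bs : List Bool) (mx cur : Int), 0 ≤ cur → cur ≤ mx →
    pvMaxRun bs mx cur = max mx (pvH cur bs) := by
  intro bs
  induction bs with
  | nil => intro mx cur h0 h1; simp [pvMaxRun, pvH]; omega
  | cons b bs ih =>
    intro mx cur h0 h1
    cases b with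
    | true =>
      have e1 : pvMaxRun (true :: bs) mx cur = pvMaxRun bs (max mx (cur + 1)) (cur + 1) := rfl
      have e2 : pvH cur (true :: bs) = max (cur + 1) (pvH (cur + 1) bs) := rfl
      rw [e1, e2, ih (max mx (cur + 1)) (cur + 1) (by omega) (le_max_right _ _), max_assoc]
    | false =>
      have e1 : pvMaxRun (false :: bs) mx cur = pvMaxRun bs mx 0 := rfl
      have e2 : pvH cur (false :: bs) = pvH 0 bs := rfl
      rw [e1, e2, ih mx 0 le_rfl (by omega)]

theorem pv_groupRuns_pos : ∀ (bs : List Bool) (p : Bool × Int), p ∈ pvGroupRuns bs → 1 ≤ p.2 := by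
  intro bs
  induction bs with
  | nil => intro p hp; simp [pvGroupRuns] at hp
  | cons b bs ih =>
    intro p hp
    cases hg : pvGroupRuns bs with
    | nil => simp only [pvGroupRuns, hg] at hp; simp at hp; simp [hp]
    | cons q t =>
      obtain ⟨k, n⟩ := q
      simp only [pvGroupRuns, hg] at hp
      by_cases hk : (k == b) = true
      · rw [if_pos hk] at hp
        rcases List.mem_cons.1 hp with h | h
        · subst h
          have := ih (k, n) (by rw [hg]; exact List.mem_cons_self)
          simp only at this ⊢
          omega
        · exact ih p (by rw [hg]; exact List.mem_cons_of_mem _ h)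
      · rw [if_neg hk] at hp
        rcases List.mem_cons.1 hp with h | h
        · subst h; simp
        · exact ih p (by rw [hg]; exact h)

theorem pv_H_eq_bump : ∀ (bs : List Bool) (cur : Int), 0 ≤ cur → pvH cur bs = pvBump cur bs := by
  intro bs
  induction bs with
  | nil => intro cur h; simp [pvH, pvBump, pvGroupRuns, pvF]
  | cons b bs ih =>
    intro cur h
    cases b with
    | false =>
      have hs : pvH cur (false :: bs) = pvH 0 bs := by simp [pvH]
      rw [hs, ih 0 le_rfl]
      cases hgbs : pvGroupRuns bs with
      | nil =>
        simp [pvBump, pvGroupRuns, hgbs, pvF, pvSel]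
      | cons q t =>
        obtain ⟨k, m⟩ := q
        cases k with
        | true => simp [pvBump, pvGroupRuns, hgbs, pvF, pvSel]
        | false => simp [pvBump, pvGroupRuns, hgbs, pvF, pvSel]
    | true =>
      have hs : pvH cur (true :: bs) = max (cur + 1) (pvH (cur + 1) bs) := by simp [pvH]
      rw [hs, ih (cur + 1) (by omega)]
      cases hgbs : pvGroupRuns bs with
      | nil =>
        simp only [pvBump, pvGroupRuns, hgbs, pvF, pvSel]
        simp
        exact max_comm _ _
      | cons q t =>
        obtain ⟨k, n⟩ := q
        have hn : 1 ≤ n := pv_groupRuns_pos bs (k, n) (by rw [hgbs]; exact List.mem_cons_self)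
        cases k with
        | true =>
          simp only [pvBump, pvGroupRuns, hgbs, BEq.rfl, if_pos]
          rw [pv_foldl_max_cons, pv_foldl_max_cons]
          omega
        | false =>
          simp only [pvBump, pvGroupRuns, hgbs]
          rw [if_neg (by simp)]
          simp only [pvF, List.filterMap_cons, pvSel]
          rw [hgbs]
          simp only [List.filterMap_cons]
          rw [pv_foldl_max_cons]

theorem pv_H_nonneg : ∀ (bs : List Bool) (cur : Int), 0 ≤ pvH cur bs := by
  intro bs
  induction bs with
  | nil => intro cur; simp [pvH]
  | cons b bs ih =>
    intro cur
    cases b with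
    | true =>
      have := ih (cur + 1)
      have e : pvH cur (true :: bs) = max (cur + 1) (pvH (cur + 1) bs) := rfl
      rw [e]
      omega
    | false => simpa [pvH] using ih 0

-- ===== VERDICT (by name: the statement is the Claim_ definition above) =====
theorem check_consecutive_matches_spec : Claim_equal_check_consecutive_matches := by
  intro schedule team is_home _ _
  unfold Spec_check_consecutive_matches check_consecutive_matches check_consecutive_matches_alt
  rw [pv_foldl_eq_maxRun, pv_maxRun_eq_H _ 0 0 le_rfl le_rfl]
  set bs := schedule.map (fun m => PySem.List.pyGet? m (if is_home then 2 else 3) == some team) with hbs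
  have h1 : pvH 0 bs = pvBump 0 bs := pv_H_eq_bump bs 0 le_rfl
  have h2 : pvBump 0 bs = pvF bs := by
    unfold pvBump pvF
    cases hg : pvGroupRuns bs with
    | nil => rfl
    | cons q t =>
      obtain ⟨k, n⟩ := q
      cases k with
      | true => simp [pvSel]
      | false => rfl
  have h3 : 0 ≤ pvH 0 bs := pv_H_nonneg bs 0
  show max 0 (pvH 0 bs) = pvF bs
  rw [← h2, ← h1]
  omega
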